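-- pv_equiv track=rewrite | github.com/YIHAO0225/Multimodal-PII-Redaction-System | backend/Function/AWSTEST.py | _match_pii
-- ===== SOURCE A (Python) =====
-- def _normalize(text):
--     """Normalize text"""
--     return ''.join(e for e in text if e.isalnum())
--
-- def _match_pii(norm_phrase, df, max_window=6):
--     """Match PII"""
--     tokens = [_normalize(t["text"]) for t in df]
--     raw_tokens = [t["text"] for t in df]
--
--     for w in range(1, max_window + 1):
--         for i in range(len(tokens) - w + 1):
--             slice_norm = tokens[i:i + w]
--             slice_raw = raw_tokens[i:i + w]
--             concat_plain = ''.join(slice_norm)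
--             concat_hyphen = _normalize('-'.join(slice_raw))
--
--             if norm_phrase in concat_plain or norm_phrase in concat_hyphen:
--                 return df[i:i + w]
--     return None
-- ===== SOURCE B (Python) =====
-- def _normalize(text):
--     """Normalize text"""
--     return ''.join(e for e in text if e.isalnum())
--
-- def _match_pii(norm_phrase, df, max_window=6):
--     """Match PII: one normalized concatenation + token offsets; for each start
--     token find the earliest phrase occurrence at/after it, map it to the minimal
--     covering window, and keep the lexicographically least (width, start)."""
--     norms = [_normalize(t["text"]) for t in df]
--     offs = [0]
--     for s in norms:
--         offs.append(offs[-1] + len(s))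
--     S = ''.join(norms)
--     L = len(norm_phrase)
--     best = None  # (window width, start index)
--     for i in range(len(norms)):
--         p = S.find(norm_phrase, offs[i])
--         if p == -1:
--             continue
--         j = i + 1
--         while offs[j] < p + L:
--             j += 1
--         w = j - i
--         if w <= max_window and (best is None or (w, i) < best):
--             best = (w, i)
--     if best is None:
--         return None
--     w, i = best
--     return df[i:i + w]
-- ===== Notes on version B (the rewrite author's own statement) =====
-- stated objective: alternative
-- what changed: B builds the normalized concatenation S and a token-offset table once, then for each start token maps the earliest phrase occurrence found in S to its minimal covering token window and keeps the lexicographically least (width, start), instead of A's width-major rescan that re-joins and re-searches every window (and its redundant hyphen branch).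
import Mathlib
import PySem

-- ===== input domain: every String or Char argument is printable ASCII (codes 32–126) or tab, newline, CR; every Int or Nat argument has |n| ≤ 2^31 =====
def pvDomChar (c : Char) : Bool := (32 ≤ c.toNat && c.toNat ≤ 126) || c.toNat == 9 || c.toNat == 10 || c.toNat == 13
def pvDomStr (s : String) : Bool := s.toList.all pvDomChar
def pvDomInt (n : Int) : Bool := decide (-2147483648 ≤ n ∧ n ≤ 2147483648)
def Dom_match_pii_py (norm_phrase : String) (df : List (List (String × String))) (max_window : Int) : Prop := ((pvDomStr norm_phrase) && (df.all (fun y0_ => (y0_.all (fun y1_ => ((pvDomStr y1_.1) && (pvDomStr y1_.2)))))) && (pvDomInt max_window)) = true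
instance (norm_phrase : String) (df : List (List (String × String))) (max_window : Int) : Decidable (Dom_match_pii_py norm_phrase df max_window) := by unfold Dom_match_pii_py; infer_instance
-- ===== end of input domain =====

-- B builds the normalized concatenation and a token-offset table once and maps each
-- phrase occurrence (via find) to its minimal covering token window, instead of A's
-- width-major rescan that re-joins and re-searches every window (objective: alternative).

-- ===== PORT A =====
-- _normalize: ''.join(e for e in text if e.isalnum())
def pvNormalize (text : String) : String :=
  String.ofList (text.toList.foldl (fun acc e => if PySem.Chars.isalnum e then acc ++ [e] else acc) [])

-- t["text"]; a missing "text" key is a KeyError, excluded by Pre_match_pii_py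
def pvText (t : List (String × String)) : String :=
  ((PySem.Dict.mk t).get? "text").getD ""

-- inner 'for i in range(len(tokens) - w + 1)' with early return
def pvAInner (norm_phrase : String) (df : List (List (String × String)))
    (tokens raw_tokens : List String) (w : Int) :
    List Int → Option (List (List (String × String)))
  | [] => none
  | i :: rest =>
    let slice_norm := PySem.List.slice tokens (some i) (some (i + w))
    let slice_raw := PySem.List.slice raw_tokens (some i) (some (i + w))
    let concat_plain := PySem.Str.join "" slice_norm
    let concat_hyphen := pvNormalize (PySem.Str.join "-" slice_raw)
    if PySem.Str.isIn norm_phrase concat_plain || PySem.Str.isIn norm_phrase concat_hyphen then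
      some (PySem.List.slice df (some i) (some (i + w)))
    else
      pvAInner norm_phrase df tokens raw_tokens w rest

-- outer 'for w in range(1, max_window + 1)' with early return
def pvAOuter (norm_phrase : String) (df : List (List (String × String)))
    (tokens raw_tokens : List String) :
    List Int → Option (List (List (String × String)))
  | [] => none
  | w :: rest =>
    match pvAInner norm_phrase df tokens raw_tokens w
        (PySem.List.pyRange 0 ((tokens.length : Int) - w + 1)) with
    | some r => some r
    | none => pvAOuter norm_phrase df tokens raw_tokens rest

def match_pii_py (norm_phrase : String) (df : List (List (String × String))) (max_window : Int) :
    Option (List (List (String × String))) :=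
  let tokens := df.map (fun t => pvNormalize (pvText t))
  let raw_tokens := df.map (fun t => pvText t)
  pvAOuter norm_phrase df tokens raw_tokens (PySem.List.pyRange 1 (max_window + 1))

-- ===== PORT B =====
-- 'while offs[j] < target: j += 1' (fuel only makes the loop total; it is never exhausted,
-- since the last offset is len(S) ≥ target whenever the loop is entered)
def pvBWhile (offs : List Int) (target : Int) : Int → Nat → Int
  | j, 0 => j
  | j, fuel + 1 =>
    if PySem.List.pyGetD offs j 0 < target then pvBWhile offs target (j + 1) fuel else j

-- 'for i in range(len(norms))' maintaining best = (window width, start)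
def pvBBest (S norm_phrase : String) (offs : List Int) (max_window : Int) :
    List Int → Option (Int × Int) → Option (Int × Int)
  | [], best => best
  | i :: rest, best =>
    let p := PySem.Str.findFrom S norm_phrase (PySem.List.pyGetD offs i 0)
    if p = -1 then pvBBest S norm_phrase offs max_window rest best
    else
      let j := pvBWhile offs (p + PySem.Str.len norm_phrase) (i + 1) offs.length
      let w := j - i
      if decide (w ≤ max_window) && (match best with
          | none => true
          | some (bw, bi) => decide (w < bw) || (decide (w = bw) && decide (i < bi))) then
        pvBBest S norm_phrase offs max_window rest (some (w, i))
      else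
        pvBBest S norm_phrase offs max_window rest best

def match_pii_py_alt (norm_phrase : String) (df : List (List (String × String))) (max_window : Int) :
    Option (List (List (String × String))) :=
  let norms := df.map (fun t => pvNormalize (pvText t))
  let offs := norms.foldl
    (fun offs s => offs ++ [PySem.List.pyGetD offs (-1) 0 + PySem.Str.len s]) [0]
  let S := PySem.Str.join "" norms
  match pvBBest S norm_phrase offs max_window
      (PySem.List.pyRange 0 (norms.length : Int)) none with
  | none => none
  | some (w, i) => some (PySem.List.slice df (some i) (some (i + w)))

-- ===== PRECONDITION & SPEC =====
-- Pre_ excludes exactly the rows without a "text" key, on which Python's t["text"] raises KeyError.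
def Pre_match_pii_py (norm_phrase : String) (df : List (List (String × String))) (max_window : Int) : Prop :=
  ∀ t ∈ df, (PySem.Dict.mk t).contains "text" = true
instance (norm_phrase : String) (df : List (List (String × String))) (max_window : Int) : Decidable (Pre_match_pii_py norm_phrase df max_window) := by unfold Pre_match_pii_py; infer_instance

def pvWitness_match_pii_py : String × (List (List (String × String))) × Int :=
  ("ab", [[("text", "a-")], [("text", "b")]], 6)

def Spec_match_pii_py (norm_phrase : String) (df : List (List (String × String))) (max_window : Int) (out : Option (List (List (String × String)))) : Prop := out = match_pii_py_alt norm_phrase df max_window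
instance (norm_phrase : String) (df : List (List (String × String))) (max_window : Int) (out : Option (List (List (String × String)))) : Decidable (Spec_match_pii_py norm_phrase df max_window out) := by unfold Spec_match_pii_py; infer_instance

-- ===== CLAIM (what is proved, stated in full; the proofs are below) =====
def Claim_equal_match_pii_py : Prop := ∀ (norm_phrase : String) (df : List (List (String × String))) (max_window : Int), Dom_match_pii_py norm_phrase df max_window → Pre_match_pii_py norm_phrase df max_window → Spec_match_pii_py norm_phrase df max_window (match_pii_py norm_phrase df max_window)

-- ===== LEMMAS AND PROOFS =====

def pvToks (df : List (List (String × String))) : List (List Char) :=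
  df.map (fun t => List.filter PySem.Chars.isalnum (pvText t).toList)

def pvOff (toks : List (List Char)) (i : Nat) : Nat := ((toks.take i).map List.length).sum

def pvGoodB (ph : List Char) (toks : List (List Char)) (i w : Nat) : Bool :=
  PySem.Chars.isIn ph ((toks.drop i).take w).flatten

lemma pvPrefix_flatten {α : Type} {l₁ l₂ : List (List α)} (h : l₁ <+: l₂) :
    l₁.flatten <+: l₂.flatten := by
  obtain ⟨t, rfl⟩ := h
  exact ⟨t.flatten, by simp⟩

lemma pvOff_eq_len (toks : List (List Char)) (i : Nat) :
    pvOff toks i = ((toks.take i).flatten).length := by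
  simp [pvOff, List.length_flatten]

lemma pvOff_mono (toks : List (List Char)) {i j : Nat} (h : i ≤ j) :
    pvOff toks i ≤ pvOff toks j := by
  rw [pvOff_eq_len, pvOff_eq_len]
  exact (pvPrefix_flatten (List.take_prefix_take_left h)).length_le

lemma pvOff_self (toks : List (List Char)) : pvOff toks toks.length = toks.flatten.length := by
  rw [pvOff_eq_len, List.take_length]

lemma pvOff_le (toks : List (List Char)) (i : Nat) : pvOff toks i ≤ toks.flatten.length := by
  rcases le_or_gt i toks.length with h | h
  · exact (pvOff_self toks) ▸ pvOff_mono toks h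
  · rw [pvOff_eq_len, List.take_of_length_le (le_of_lt h)]

lemma pvFlatten_drop (toks : List (List Char)) (i : Nat) :
    toks.flatten.drop (pvOff toks i) = (toks.drop i).flatten := by
  have hsplit : toks.flatten = (toks.take i).flatten ++ (toks.drop i).flatten := by
    rw [← List.flatten_append, List.take_append_drop]
  rw [hsplit]
  exact List.drop_left' (pvOff_eq_len toks i).symm

lemma pvOff_add (toks : List (List Char)) (i w : Nat) :
    pvOff toks (i + w) = pvOff toks i + (((toks.drop i).take w).flatten).length := by
  rw [pvOff_eq_len, pvOff_eq_len, List.take_add, List.flatten_append, List.length_append]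

lemma pvSeg (toks : List (List Char)) (i w : Nat) :
    ((toks.drop i).take w).flatten
      = (toks.flatten.drop (pvOff toks i)).take (pvOff toks (i + w) - pvOff toks i) := by
  rw [pvFlatten_drop]
  have h1 : (toks.drop i).flatten
      = ((toks.drop i).take w).flatten ++ ((toks.drop i).drop w).flatten := by
    rw [← List.flatten_append, List.take_append_drop]
  have h2 : pvOff toks (i + w) - pvOff toks i = (((toks.drop i).take w).flatten).length := by
    rw [pvOff_add]; omega
  rw [h1, h2, List.take_left']
  rfl

lemma pvGood_iff_occ (ph : List Char) (toks : List (List Char)) (i w : Nat) :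
    pvGoodB ph toks i w = true ↔
      ∃ p, pvOff toks i ≤ p ∧ p + ph.length ≤ pvOff toks (i + w) ∧
        ph <+: toks.flatten.drop p := by
  have hmono := pvOff_mono toks (Nat.le_add_right i w)
  rw [pvGoodB, ← PySem.Chars.exists_prefix_drop_iff_isIn, pvSeg]
  constructor
  · rintro ⟨j, hj⟩
    rw [List.drop_take, List.drop_drop] at hj
    rw [List.prefix_take_iff] at hj
    obtain ⟨hpre, hlen⟩ := hj
    by_cases hc : pvOff toks i + j + ph.length ≤ pvOff toks (i + w)
    · exact ⟨pvOff toks i + j, by omega, by omega, hpre⟩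
    · have hL : ph.length = 0 := by omega
      have : ph = [] := List.length_eq_zero_iff.mp hL
      exact ⟨pvOff toks i, le_refl _, by omega, by simp [this]⟩
  · rintro ⟨p, hap, hpb, hpre⟩
    refine ⟨p - pvOff toks i, ?_⟩
    rw [List.drop_take, List.drop_drop, List.prefix_take_iff]
    constructor
    · have h : pvOff toks i + (p - pvOff toks i) = p := by omega
      rwa [h]
    · omega

def pvTokens (df : List (List (String × String))) : List String :=
  df.map (fun t => pvNormalize (pvText t))

def pvRaws (df : List (List (String × String))) : List String :=
  df.map (fun t => pvText t)

lemma pvNormalize_toList (s : String) :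
    (pvNormalize s).toList = s.toList.filter PySem.Chars.isalnum := by
  simp [pvNormalize, PySem.List.foldl_append_if_eq_filter]

lemma pvToks_eq (df : List (List (String × String))) :
    (pvTokens df).map String.toList = pvToks df := by
  simp [pvTokens, pvToks, Function.comp_def, pvNormalize_toList]

lemma pvJoin_nil_flatten (parts : List (List Char)) :
    PySem.Chars.join [] parts = parts.flatten := by
  induction parts with
  | nil => simp [PySem.Chars.join_nil]
  | cons p rest ih =>
    cases rest with
    | nil => simp [PySem.Chars.join_singleton]
    | cons q r => rw [PySem.Chars.join_cons_cons]; simp [ih]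

lemma pvFilter_join_hyphen (parts : List (List Char)) :
    (PySem.Chars.join ['-'] parts).filter PySem.Chars.isalnum
      = (parts.map (List.filter PySem.Chars.isalnum)).flatten := by
  induction parts with
  | nil => simp [PySem.Chars.join_nil]
  | cons p rest ih =>
    cases rest with
    | nil => simp [PySem.Chars.join_singleton]
    | cons q r =>
      rw [PySem.Chars.join_cons_cons]
      have h : List.filter PySem.Chars.isalnum ['-'] = [] := by decide
      simp only [List.filter_append, h, ih]
      simp

def pvTestA (np : String) (df : List (List (String × String))) (w i : Int) : Bool :=
  PySem.Str.isIn np (PySem.Str.join ""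
      (PySem.List.slice (pvTokens df) (some i) (some (i + w)))) ||
  PySem.Str.isIn np (pvNormalize (PySem.Str.join "-"
      (PySem.List.slice (pvRaws df) (some i) (some (i + w)))))

lemma pvTestA_eq (np : String) (df : List (List (String × String))) (i w : Nat) :
    pvTestA np df (w : Int) (i : Int) = pvGoodB np.toList (pvToks df) i w := by
  have hc : (i : Int) + (w : Int) = ((i + w : Nat) : Int) := by push_cast; ring
  have hseg : ∀ (l : List String),
      (List.map String.toList (List.take w (List.drop i l)))
        = List.take w (List.drop i (l.map String.toList)) := by
    intro l; rw [List.map_take, List.map_drop]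
  have h1 : (PySem.Str.join "" (PySem.List.slice (pvTokens df) (some (i:Int)) (some ((i:Int) + (w:Int))))).toList
      = (((pvToks df).drop i).take w).flatten := by
    rw [hc, PySem.List.slice_natCast, PySem.Str.toList_join]
    have : ("" : String).toList = [] := rfl
    rw [this, pvJoin_nil_flatten]
    rw [Nat.add_sub_cancel_left, hseg, pvToks_eq]
  have h2 : (pvNormalize (PySem.Str.join "-" (PySem.List.slice (pvRaws df) (some (i:Int)) (some ((i:Int) + (w:Int)))))).toList
      = (((pvToks df).drop i).take w).flatten := by
    rw [hc, PySem.List.slice_natCast, pvNormalize_toList, PySem.Str.toList_join]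
    have : ("-" : String).toList = ['-'] := rfl
    rw [this, pvFilter_join_hyphen, Nat.add_sub_cancel_left]
    rw [List.map_map]
    have : (List.filter PySem.Chars.isalnum ∘ String.toList) ∘ (fun t => pvText t)
        = fun t => List.filter PySem.Chars.isalnum (pvText t).toList := rfl
    simp only [pvRaws, List.map_take, List.map_drop, List.map_map, this]
    rfl
  rw [pvTestA, PySem.Str.isIn_eq, PySem.Str.isIn_eq, h1, h2, Bool.or_self, pvGoodB]

lemma pvAInner_eq (np : String) (df : List (List (String × String))) (w : Int) (is : List Int) :
    pvAInner np df (pvTokens df) (pvRaws df) w is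
      = (is.find? (pvTestA np df w)).map
          (fun i => PySem.List.slice df (some i) (some (i + w))) := by
  induction is with
  | nil => rfl
  | cons i rest ih =>
    have hgoal : pvAInner np df (pvTokens df) (pvRaws df) w (i :: rest)
        = if pvTestA np df w i = true then some (PySem.List.slice df (some i) (some (i + w)))
          else pvAInner np df (pvTokens df) (pvRaws df) w rest := rfl
    rw [hgoal, List.find?_cons]
    cases h : pvTestA np df w i
    · rw [if_neg (by simp), ih]
    · rw [if_pos rfl]; rfl

lemma pvAOuter_eq (np : String) (df : List (List (String × String))) (ws : List Int) :
    pvAOuter np df (pvTokens df) (pvRaws df) ws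
      = ws.findSome? (fun w => pvAInner np df (pvTokens df) (pvRaws df) w
          (PySem.List.pyRange 0 (((pvTokens df).length : Int) - w + 1))) := by
  induction ws with
  | nil => rfl
  | cons w rest ih =>
    rw [List.findSome?_cons]
    simp only [pvAOuter]
    cases h : pvAInner np df (pvTokens df) (pvRaws df) w
        (PySem.List.pyRange 0 (((pvTokens df).length : Int) - w + 1)) with
    | none => simp [ih]
    | some r => simp

lemma pvPyRange_nil {a b : Int} (h : b ≤ a) : PySem.List.pyRange a b = [] := by
  rw [List.eq_nil_iff_forall_not_mem]
  intro x hx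
  rw [PySem.List.mem_pyRange_one] at hx
  omega

lemma pvFindSome?_pyRange_none {β : Type} {f : Int → Option β} {a b : Int}
    (h : ∀ w, a ≤ w → w < b → f w = none) :
    (PySem.List.pyRange a b).findSome? f = none := by
  by_cases hab : b ≤ a
  · rw [pvPyRange_nil hab]; rfl
  · have key : ∀ (n : Nat) (a : Int), (b - a).toNat = n → (∀ w, a ≤ w → w < b → f w = none) →
        (PySem.List.pyRange a b).findSome? f = none := by
      intro n
      induction n with
      | zero => intro a ha _; rw [pvPyRange_nil (by omega)]; rfl
      | succ n ih =>
        intro a ha hf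
        rw [PySem.List.pyRange_one_cons (by omega), List.findSome?_cons, hf a (le_refl _) (by omega)]
        exact ih (a + 1) (by omega) (fun w hw1 hw2 => hf w (by omega) hw2)
    exact key (b - a).toNat a rfl h

lemma pvFindSome?_pyRange_first {β : Type} {f : Int → Option β} {a b w₀ : Int}
    (haw : a ≤ w₀) (hwb : w₀ < b) (hnone : ∀ w, a ≤ w → w < w₀ → f w = none)
    (hsome : f w₀ ≠ none) :
    (PySem.List.pyRange a b).findSome? f = f w₀ := by
  have key : ∀ (n : Nat) (a : Int), (w₀ - a).toNat = n → a ≤ w₀ →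
      (∀ w, a ≤ w → w < w₀ → f w = none) →
      (PySem.List.pyRange a b).findSome? f = f w₀ := by
    intro n
    induction n with
    | zero =>
      intro a ha haw' _
      have : a = w₀ := by omega
      subst this
      rw [PySem.List.pyRange_one_cons (by omega), List.findSome?_cons]
      cases hv : f a with
      | none => exact absurd hv hsome
      | some v => rfl
    | succ n ih =>
      intro a ha haw' hf
      rw [PySem.List.pyRange_one_cons (by omega), List.findSome?_cons, hf a (le_refl _) (by omega)]
      exact ih (a + 1) (by omega) (by omega) (fun w hw1 hw2 => hf w (by omega) hw2)
  exact key (w₀ - a).toNat a rfl haw hnone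

lemma pvFind?_pyRange_none {p : Int → Bool} {a b : Int}
    (h : ∀ w, a ≤ w → w < b → p w = false) :
    (PySem.List.pyRange a b).find? p = none := by
  rw [List.find?_eq_none]
  intro x hx
  rw [PySem.List.mem_pyRange_one] at hx
  simp [h x hx.1 hx.2]

lemma pvFind?_pyRange_first {p : Int → Bool} {a b x : Int}
    (hax : a ≤ x) (hxb : x < b) (hprev : ∀ y, a ≤ y → y < x → p y = false)
    (hx : p x = true) :
    (PySem.List.pyRange a b).find? p = some x := by
  have key : ∀ (n : Nat) (c : Int), (x - c).toNat = n → c ≤ x →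
      (∀ y, c ≤ y → y < x → p y = false) →
      (PySem.List.pyRange c b).find? p = some x := by
    intro n
    induction n with
    | zero =>
      intro c hc hcx _
      have : c = x := by omega
      subst this
      rw [PySem.List.pyRange_one_cons (by omega), List.find?_cons]
      simp [hx]
    | succ n ih =>
      intro c hc hcx hpr
      rw [PySem.List.pyRange_one_cons (by omega), List.find?_cons]
      rw [hpr c (le_refl _) (by omega)]
      exact ih (c + 1) (by omega) (by omega) (fun y hy1 hy2 => hpr y (by omega) hy2)
  exact key (x - a).toNat a rfl hax hprev

def pvOffsL (df : List (List (String × String))) : List Int :=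
  (List.range (df.length + 1)).map (fun k => ((pvOff (pvToks df) k : Nat) : Int))

lemma pvGetLast_append (xs : List Int) (x : Int) :
    PySem.List.pyGetD (xs ++ [x]) (-1) 0 = x := by
  simp only [PySem.List.pyGetD, PySem.List.pyGet?, PySem.List.pyIdx?, List.length_append,
    List.length_cons, List.length_nil]
  norm_num

lemma pvS_toList (df : List (List (String × String))) :
    (PySem.Str.join "" (pvTokens df)).toList = (pvToks df).flatten := by
  rw [PySem.Str.toList_join]
  have h : ("" : String).toList = [] := rfl
  rw [h, pvJoin_nil_flatten, pvToks_eq]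

lemma pvOffs_build (df : List (List (String × String))) :
    (pvTokens df).foldl
        (fun offs s => offs ++ [PySem.List.pyGetD offs (-1) 0 + PySem.Str.len s]) [0]
      = pvOffsL df := by
  have gen : ∀ (l : List String),
      l.foldl (fun offs s => offs ++ [PySem.List.pyGetD offs (-1) 0 + PySem.Str.len s]) [0]
        = (List.range (l.length + 1)).map
            (fun k => ((pvOff (l.map String.toList) k : Nat) : Int)) := by
    intro l
    induction l using List.reverseRecOn with
    | nil => simp [pvOff]
    | append_singleton l s ih =>
      rw [List.foldl_append, ih, List.foldl_cons, List.foldl_nil]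
      have hsplit : List.range (l.length + 1) = List.range l.length ++ [l.length] :=
        List.range_succ
      have hlast : PySem.List.pyGetD ((List.range (l.length + 1)).map
          (fun k => ((pvOff (l.map String.toList) k : Nat) : Int))) (-1) 0
          = ((pvOff (l.map String.toList) l.length : Nat) : Int) := by
        rw [hsplit, List.map_append, List.map_singleton]
        exact pvGetLast_append _ _
      rw [hlast]
      have hlen : (l ++ [s]).length + 1 = (l.length + 1) + 1 := by simp
      rw [hlen]
      rw [show List.range (l.length + 1 + 1) = List.range (l.length + 1) ++ [l.length + 1] from
        List.range_succ]
      rw [List.map_append, List.map_singleton]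
      congr 1
      · apply List.map_congr_left
        intro k hk
        rw [List.mem_range] at hk
        have h : pvOff (List.map String.toList (l ++ [s])) k
            = pvOff (List.map String.toList l) k := by
          rw [pvOff_eq_len, pvOff_eq_len, List.map_append,
            List.take_append_of_le_length (by simp; omega)]
        rw [h]
      · rw [PySem.Str.len_eq]
        have h1 : pvOff ((l ++ [s]).map String.toList) (l.length + 1)
            = pvOff (l.map String.toList) l.length + s.toList.length := by
          rw [pvOff_eq_len, pvOff_eq_len, List.map_append]
          rw [List.take_of_length_le (by simp), List.take_of_length_le (by simp)]
          simp
        rw [h1]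
        push_cast
        ring_nf
  rw [gen (pvTokens df), pvToks_eq]
  have : (pvTokens df).length = df.length := by simp [pvTokens]
  rw [this, pvOffsL]

lemma pvOffs_get (df : List (List (String × String))) {k : Nat} (hk : k ≤ df.length) :
    PySem.List.pyGetD (pvOffsL df) (k : Int) 0 = ((pvOff (pvToks df) k : Nat) : Int) := by
  rw [pvOffsL, PySem.List.pyGetD_natCast]
  rw [List.getD_eq_getElem?_getD, List.getElem?_map, List.getElem?_range (by omega)]
  rfl

lemma pvOffs_len (df : List (List (String × String))) :
    (pvOffsL df).length = df.length + 1 := by simp [pvOffsL]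

lemma pvToks_len (df : List (List (String × String))) :
    (pvToks df).length = df.length := by simp [pvToks]

lemma pvBWhile_spec (df : List (List (String × String))) (target : Int)
    (htot : target ≤ ((pvOff (pvToks df) df.length : Nat) : Int)) :
    ∀ (fuel j0 : Nat), j0 ≤ df.length → df.length - j0 < fuel →
    ∃ m : Nat, pvBWhile (pvOffsL df) target (j0 : Int) fuel = (m : Int) ∧
      j0 ≤ m ∧ m ≤ df.length ∧ target ≤ ((pvOff (pvToks df) m : Nat) : Int) ∧
      ∀ k, j0 ≤ k → k < m → ((pvOff (pvToks df) k : Nat) : Int) < target := by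
  intro fuel
  induction fuel with
  | zero => intro j0 h1 h2; omega
  | succ fuel ih =>
    intro j0 h1 h2
    rw [pvBWhile]
    by_cases hlt : PySem.List.pyGetD (pvOffsL df) (j0 : Int) 0 < target
    · rw [if_pos hlt]
      rw [pvOffs_get df h1] at hlt
      have hj0n : j0 < df.length := by
        rcases Nat.lt_or_ge j0 df.length with h | h
        · exact h
        · have : j0 = df.length := by omega
          subst this; omega
      have hcast : (j0 : Int) + 1 = ((j0 + 1 : Nat) : Int) := by push_cast; ring
      rw [hcast]
      obtain ⟨m, hm, hm1, hm2, hm3, hm4⟩ := ih (j0 + 1) (by omega) (by omega)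
      refine ⟨m, hm, by omega, hm2, hm3, ?_⟩
      intro k hk1 hk2
      rcases Nat.eq_or_lt_of_le hk1 with rfl | h
      · exact hlt
      · exact hm4 k (by omega) hk2
    · rw [if_neg hlt]
      rw [pvOffs_get df h1] at hlt
      exact ⟨j0, rfl, le_refl _, h1, by omega, by omega⟩

def pvCnd (np : String) (df : List (List (String × String))) (mw : Int) (i : Int) :
    Option (Int × Int) :=
  let S := PySem.Str.join "" (pvTokens df)
  let offs := pvOffsL df
  let p := PySem.Str.findFrom S np (PySem.List.pyGetD offs i 0)
  if p = -1 then none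
  else
    let j := pvBWhile offs (p + PySem.Str.len np) (i + 1) offs.length
    if j - i ≤ mw then some (j - i, i) else none

def pvLtB (c r : Int × Int) : Bool :=
  decide (c.1 < r.1) || (decide (c.1 = r.1) && decide (c.2 < r.2))

def pvBeatsB (c best : Option (Int × Int)) : Bool :=
  match c, best with
  | none, _ => false
  | some _, none => true
  | some pc, some pb => pvLtB pc pb

lemma pvBeatsB_irrefl (b : Option (Int × Int)) : pvBeatsB b b = false := by
  cases b with
  | none => rfl
  | some p => simp [pvBeatsB, pvLtB]

lemma pvBeats_ff_trans {c b r : Option (Int × Int)}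
    (h1 : pvBeatsB c b = false) (h2 : pvBeatsB b r = false) : pvBeatsB c r = false := by
  cases c with
  | none => rfl
  | some pc =>
    cases b with
    | none => simp [pvBeatsB] at h1
    | some pb =>
      cases r with
      | none => simp [pvBeatsB] at h2
      | some pr =>
        simp [pvBeatsB, pvLtB] at h1 h2 ⊢
        omega

lemma pvBeats_tf {b' best r : Option (Int × Int)}
    (h1 : pvBeatsB b' best = true) (h2 : pvBeatsB b' r = false) :
    pvBeatsB best r = false := by
  cases best with
  | none => rfl
  | some pb =>
    cases b' with
    | none => simp [pvBeatsB] at h1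
    | some pc =>
      cases r with
      | none => simp [pvBeatsB] at h2
      | some pr =>
        simp [pvBeatsB, pvLtB] at h1 h2 ⊢
        omega

lemma pvStep (np : String) (df : List (List (String × String))) (mw : Int)
    (i : Int) (rest : List Int) (best : Option (Int × Int)) :
    pvBBest (PySem.Str.join "" (pvTokens df)) np (pvOffsL df) mw (i :: rest) best
      = pvBBest (PySem.Str.join "" (pvTokens df)) np (pvOffsL df) mw rest
          (if pvBeatsB (pvCnd np df mw i) best then pvCnd np df mw i else best) := by
  simp only [pvBBest, pvCnd]
  by_cases hp : PySem.Str.findFrom (PySem.Str.join "" (pvTokens df)) np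
      (PySem.List.pyGetD (pvOffsL df) i 0) = -1
  · rw [if_pos hp, if_pos hp]
    simp [pvBeatsB]
  · rw [if_neg hp, if_neg hp]
    set w := pvBWhile (pvOffsL df) (PySem.Str.findFrom (PySem.Str.join "" (pvTokens df)) np
      (PySem.List.pyGetD (pvOffsL df) i 0) + PySem.Str.len np) (i + 1) (pvOffsL df).length - i with hw
    by_cases hmw : w ≤ mw
    · rw [if_pos hmw]
      cases best with
      | none =>
        rw [if_pos (by simp [hmw])]
        simp [pvBeatsB]
      | some pb =>
        simp only [pvBeatsB, pvLtB]
        by_cases hlt : (decide (w < pb.1) || (decide (w = pb.1) && decide (i < pb.2))) = true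
        · rw [if_pos (by simp [hmw, hlt])]
          cases pb with
          | mk bw bi => simp only at hlt; rw [if_pos hlt]
        · rw [if_neg (by simp_all)]
          cases pb with
          | mk bw bi => simp only at hlt; rw [if_neg hlt]
    · rw [if_neg hmw]
      have : (decide (w ≤ mw) && (match best with
          | none => true
          | some (bw, bi) => decide (w < bw) || (decide (w = bw) && decide (i < bi)))) = false := by
        simp [hmw]
      rw [this]
      simp [pvBeatsB]

lemma pvFold_char (np : String) (df : List (List (String × String))) (mw : Int) :
    ∀ (is : List Int) (best : Option (Int × Int)),
    (pvBBest (PySem.Str.join "" (pvTokens df)) np (pvOffsL df) mw is best = best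
      ∨ ∃ i ∈ is, pvBBest (PySem.Str.join "" (pvTokens df)) np (pvOffsL df) mw is best
            = pvCnd np df mw i ∧ pvCnd np df mw i ≠ none)
    ∧ (∀ i ∈ is, pvBeatsB (pvCnd np df mw i)
        (pvBBest (PySem.Str.join "" (pvTokens df)) np (pvOffsL df) mw is best) = false)
    ∧ pvBeatsB best
        (pvBBest (PySem.Str.join "" (pvTokens df)) np (pvOffsL df) mw is best) = false := by
  intro is
  induction is with
  | nil =>
    intro best
    refine ⟨Or.inl rfl, by simp, ?_⟩
    exact pvBeatsB_irrefl best
  | cons i rest ih =>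
    intro best
    rw [pvStep]
    by_cases hb : pvBeatsB (pvCnd np df mw i) best = true
    · rw [if_pos hb]
      obtain ⟨h1, h2, h3⟩ := ih (pvCnd np df mw i)
      refine ⟨?_, ?_, ?_⟩
      · rcases h1 with h | ⟨i', hi', h, hne⟩
        · right
          refine ⟨i, List.mem_cons_self, h, ?_⟩
          intro hnone
          rw [hnone] at hb
          simp [pvBeatsB] at hb
        · exact Or.inr ⟨i', List.mem_cons_of_mem _ hi', h, hne⟩
      · intro i' hi'
        rcases List.mem_cons.mp hi' with rfl | hi'
        · exact h3
        · exact h2 i' hi'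
      · exact pvBeats_tf hb h3
    · rw [if_neg hb]
      rw [Bool.not_eq_true] at hb
      obtain ⟨h1, h2, h3⟩ := ih best
      refine ⟨?_, ?_, ?_⟩
      · rcases h1 with h | ⟨i', hi', h, hne⟩
        · exact Or.inl h
        · exact Or.inr ⟨i', List.mem_cons_of_mem _ hi', h, hne⟩
      · intro i' hi'
        rcases List.mem_cons.mp hi' with rfl | hi'
        · exact pvBeats_ff_trans hb h3
        · exact h2 i' hi'
      · exact h3

lemma pvGood_occ_ge {np : String} {df : List (List (String × String))} {i w : Nat}
    (hg : pvGoodB np.toList (pvToks df) i w = true) :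
    np.toList <:+: List.drop (pvOff (pvToks df) i) (pvToks df).flatten := by
  obtain ⟨p, hap, _, hpre⟩ := (pvGood_iff_occ np.toList (pvToks df) i w).mp hg
  have hdrop : List.drop p (pvToks df).flatten
      = List.drop (p - pvOff (pvToks df) i) (List.drop (pvOff (pvToks df) i) (pvToks df).flatten) := by
    rw [List.drop_drop]
    congr 1
    omega
  rw [hdrop] at hpre
  exact hpre.isInfix.trans (List.drop_suffix _ _).isInfix

lemma pvCnd_spec (np : String) (df : List (List (String × String))) (mw : Int)
    {i : Nat} (hi : i < df.length) :
    (pvCnd np df mw (i : Int) = none ∧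
       ∀ w : Nat, pvGoodB np.toList (pvToks df) i w = false)
    ∨ (∃ wN : Nat, 1 ≤ wN ∧ i + wN ≤ df.length ∧
        pvGoodB np.toList (pvToks df) i wN = true ∧
        (∀ w' : Nat, 1 ≤ w' → w' < wN → pvGoodB np.toList (pvToks df) i w' = false) ∧
        pvCnd np df mw (i : Int)
          = (if (wN : Int) ≤ mw then some ((wN : Int), (i : Int)) else none)) := by
  have hS : (PySem.Str.join "" (pvTokens df)).toList = (pvToks df).flatten := pvS_toList df
  have hoffle : pvOff (pvToks df) i ≤ (pvToks df).flatten.length := pvOff_le _ _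
  have hofftot : pvOff (pvToks df) df.length = (pvToks df).flatten.length := by
    rw [← pvToks_len df, pvOff_self]
  have hget : PySem.List.pyGetD (pvOffsL df) (i : Int) 0
      = ((pvOff (pvToks df) i : Nat) : Int) := pvOffs_get df (le_of_lt hi)
  have hfind : PySem.Str.findFrom (PySem.Str.join "" (pvTokens df)) np
        (PySem.List.pyGetD (pvOffsL df) (i : Int) 0)
      = PySem.Chars.findFrom (pvToks df).flatten np.toList ((pvOff (pvToks df) i : Nat) : Int) := by
    rw [hget, PySem.Str.findFrom_eq, hS]
  by_cases hF : PySem.Chars.findFrom (pvToks df).flatten np.toList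
      ((pvOff (pvToks df) i : Nat) : Int) = -1
  · left
    constructor
    · rw [pvCnd]
      simp only [hfind, hF]
      simp
    · intro w
      by_contra hg
      rw [Bool.not_eq_false] at hg
      have hninf := (PySem.Chars.findFrom_natCast_eq_neg_one_iff
        (pvToks df).flatten np.toList (pvOff (pvToks df) i) hoffle).mp hF
      exact hninf (pvGood_occ_ge hg)
  · right
    obtain ⟨hge, hpre, hmin⟩ := PySem.Chars.findFrom_natCast_spec
      (pvToks df).flatten np.toList (pvOff (pvToks df) i) hoffle hF
    set F := PySem.Chars.findFrom (pvToks df).flatten np.toList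
      ((pvOff (pvToks df) i : Nat) : Int) with hFdef
    have hF0 : 0 ≤ F := le_trans (by positivity) hge
    have hFcast : F = ((F.toNat : Nat) : Int) := by omega
    set pN := F.toNat with hpN
    have hgeN : pvOff (pvToks df) i ≤ pN := by
      have h := hge
      rw [hFcast] at h
      exact_mod_cast h
    set L := np.toList.length with hL
    have hpNle : pN + L ≤ (pvToks df).flatten.length := by
      by_cases hnil : np.toList = []
      · have : ¬ ((pvOff (pvToks df) i) < pN) := by
          intro hlt
          exact hmin (pvOff (pvToks df) i) (le_refl _) hlt (by simp [hnil])
        have h2 : pN ≤ pvOff (pvToks df) i := by omega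
        have hL0 : L = 0 := by rw [hL, hnil]; rfl
        omega
      · have hlen := hpre.length_le
        rw [List.length_drop] at hlen
        have hpos : 0 < L := by
          rw [hL]
          cases hnp : np.toList with
          | nil => exact absurd hnp hnil
          | cons a t => simp
        have hlt : pN < (pvToks df).flatten.length := by
          by_contra hge'
          rw [List.drop_eq_nil_of_le (by omega)] at hpre
          exact hnil (List.prefix_nil.mp hpre)
        omega
    have htarget : F + PySem.Str.len np = (((pN + L : Nat)) : Int) := by
      rw [PySem.Str.len_eq, hFcast]
      push_cast
      ring
    have htle : ((pN + L : Nat) : Int) ≤ ((pvOff (pvToks df) df.length : Nat) : Int) := by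
      rw [hofftot]
      exact_mod_cast hpNle
    obtain ⟨m, hmw, hm1, hm2, hm3, hm4⟩ := pvBWhile_spec df ((pN + L : Nat) : Int)
      htle ((pvOffsL df).length) (i + 1) (by omega) (by rw [pvOffs_len]; omega)
    have hcast1 : (i : Int) + 1 = ((i + 1 : Nat) : Int) := by push_cast; ring
    set wN := m - i with hwN
    have hwN1 : 1 ≤ wN := by omega
    have hiwN : i + wN = m := by omega
    refine ⟨wN, hwN1, by omega, ?_, ?_, ?_⟩
    · rw [pvGood_iff_occ]
      refine ⟨pN, hgeN, ?_, hpre⟩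
      rw [hiwN]
      exact_mod_cast hm3
    · intro w' hw'1 hw'
      by_contra hg
      rw [Bool.not_eq_false] at hg
      obtain ⟨p', hap', hpb', hpre'⟩ := (pvGood_iff_occ np.toList (pvToks df) i w').mp hg
      have hpNp' : pN ≤ p' := by
        by_contra hlt
        exact hmin p' hap' (by omega) hpre'
      have hk := hm4 (i + w') (by omega) (by omega)
      have : pN + L ≤ pvOff (pvToks df) (i + w') := by omega
      omega
    · rw [pvCnd]
      simp only [hfind]
      rw [if_neg hF, htarget, hcast1, hmw]
      have : (m : Int) - (i : Int) = ((wN : Nat) : Int) := by omega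
      rw [this]

def pvHITb (np : String) (df : List (List (String × String))) (mw : Int) (w : Nat) : Bool :=
  decide (1 ≤ w) && decide ((w : Int) ≤ mw) &&
  (List.range (df.length + 1)).any
    (fun i => decide (i + w ≤ df.length) && pvGoodB np.toList (pvToks df) i w)

lemma pvHITb_iff (np : String) (df : List (List (String × String))) (mw : Int) (w : Nat) :
    pvHITb np df mw w = true ↔
      (1 ≤ w ∧ (w : Int) ≤ mw ∧
        ∃ i, i + w ≤ df.length ∧ pvGoodB np.toList (pvToks df) i w = true) := by
  rw [pvHITb]
  simp only [Bool.and_eq_true, decide_eq_true_eq, List.any_eq_true, List.mem_range]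
  constructor
  · rintro ⟨⟨h1, h2⟩, i, _, h4, h5⟩
    exact ⟨h1, h2, i, h4, h5⟩
  · rintro ⟨h1, h2, i, h3, h4⟩
    exact ⟨⟨h1, h2⟩, i, by omega, h3, h4⟩

lemma pvTokens_len (df : List (List (String × String))) :
    (pvTokens df).length = df.length := by simp [pvTokens]

lemma pvInner_none (np : String) (df : List (List (String × String))) {w : Int}
    (hw1 : 1 ≤ w)
    (hng : ∀ iN : Nat, iN + w.toNat ≤ df.length →
      pvGoodB np.toList (pvToks df) iN w.toNat = false) :
    pvAInner np df (pvTokens df) (pvRaws df) w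
      (PySem.List.pyRange 0 (((pvTokens df).length : Int) - w + 1)) = none := by
  rw [pvAInner_eq]
  rw [pvFind?_pyRange_none]
  · rfl
  · intro i hi1 hi2
    rw [pvTokens_len] at hi2
    have hiw : i = ((i.toNat : Nat) : Int) := by omega
    have hww : w = ((w.toNat : Nat) : Int) := by omega
    rw [hiw, hww, pvTestA_eq]
    apply hng
    omega

theorem pvMain (np : String) (df : List (List (String × String))) (mw : Int) :
    match_pii_py np df mw = match_pii_py_alt np df mw := by
  have hA : match_pii_py np df mw
      = pvAOuter np df (pvTokens df) (pvRaws df) (PySem.List.pyRange 1 (mw + 1)) := rfl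
  have hB : match_pii_py_alt np df mw
      = match pvBBest (PySem.Str.join "" (pvTokens df)) np (pvOffsL df) mw
          (PySem.List.pyRange 0 (((pvTokens df).length : Int))) none with
        | none => none
        | some (w, i) => some (PySem.List.slice df (some i) (some (i + w))) := by
    rw [match_pii_py_alt]
    rw [show (df.map (fun t => pvNormalize (pvText t))) = pvTokens df from rfl]
    rw [pvOffs_build]
  rw [hA, hB, pvAOuter_eq]
  obtain ⟨h1, h2, h3⟩ := pvFold_char np df mw
    (PySem.List.pyRange 0 (((pvTokens df).length : Int))) none
  by_cases hex : ∃ w : Nat, pvHITb np df mw w = true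
  · -- a hit exists
    have hwspec := Nat.find_spec hex
    rw [pvHITb_iff] at hwspec
    obtain ⟨hw1, hw2, hexi0⟩ := hwspec
    set wst := Nat.find hex with hwstdef
    have hexi : ∃ iN : Nat, iN + wst ≤ df.length ∧
        pvGoodB np.toList (pvToks df) iN wst = true := hexi0
    obtain ⟨hi1, hi2⟩ := Nat.find_spec hexi
    set ist := Nat.find hexi with histdef
    -- A returns the (wst, ist) window
    have hAval : (PySem.List.pyRange 1 (mw + 1)).findSome?
        (fun w => pvAInner np df (pvTokens df) (pvRaws df) w
          (PySem.List.pyRange 0 (((pvTokens df).length : Int) - w + 1)))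
        = some (PySem.List.slice df (some (ist : Int)) (some ((ist : Int) + (wst : Int)))) := by
      rw [pvFindSome?_pyRange_first (w₀ := (wst : Int)) (by exact_mod_cast hw1)
        (by omega) ?_ ?_]
      · rw [pvAInner_eq, pvFind?_pyRange_first (x := (ist : Int)) (by positivity) ?_ ?_ ?_]
        · rfl
        · rw [pvTokens_len]; omega
        · intro y hy1 hy2
          have hyw : y = ((y.toNat : Nat) : Int) := by omega
          rw [hyw, pvTestA_eq]
          by_contra hg
          rw [Bool.not_eq_false] at hg
          have hlt : y.toNat < ist := by omega
          exact absurd ⟨by omega, hg⟩ (Nat.find_min hexi hlt)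
        · rw [pvTestA_eq]
          exact hi2
      · intro w hwa hwb
        apply pvInner_none np df hwa
        intro iN hiN
        by_contra hg
        rw [Bool.not_eq_false] at hg
        have hhit : pvHITb np df mw w.toNat = true := by
          rw [pvHITb_iff]
          exact ⟨by omega, by omega, iN, hiN, hg⟩
        have : wst ≤ w.toNat := Nat.find_min' hex hhit
        omega
      · intro hnone
        rw [pvAInner_eq] at hnone
        rw [pvFind?_pyRange_first (x := (ist : Int)) (by positivity) ?_ ?_ ?_] at hnone
        · simp at hnone
        · rw [pvTokens_len]; omega
        · intro y hy1 hy2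
          have hyw : y = ((y.toNat : Nat) : Int) := by omega
          rw [hyw, pvTestA_eq]
          by_contra hg
          rw [Bool.not_eq_false] at hg
          have hlt : y.toNat < ist := by omega
          exact absurd ⟨by omega, hg⟩ (Nat.find_min hexi hlt)
        · rw [pvTestA_eq]
          exact hi2
    rw [hAval]
    -- B: the fold returns (wst, ist)
    have histn : ist < df.length := by omega
    have hcist : pvCnd np df mw (ist : Int) = some ((wst : Int), (ist : Int)) := by
      rcases pvCnd_spec np df mw histn with ⟨_, hall⟩ | ⟨wN, hwN1, hiwN, hGwN, hminN, hcnd⟩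
      · exact absurd hi2 (by simp [hall wst])
      · have hwNle : wN ≤ wst := by
          by_contra hlt
          exact absurd hi2 (by simp [hminN wst hw1 (by omega)])
        have hle : wst ≤ wN := by
          apply Nat.find_min' hex
          rw [pvHITb_iff]
          exact ⟨hwN1, by omega, ist, hiwN, hGwN⟩
        have : wN = wst := by omega
        subst this
        rw [hcnd, if_pos hw2]
    have histmem : (ist : Int) ∈ PySem.List.pyRange 0 (((pvTokens df).length : Int)) := by
      rw [PySem.List.mem_pyRange_one, pvTokens_len]
      constructor
      · positivity
      · exact_mod_cast histn
    have hbeats := h2 (ist : Int) histmem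
    rw [hcist] at hbeats
    -- r cannot be none
    set r := pvBBest (PySem.Str.join "" (pvTokens df)) np (pvOffsL df) mw
      (PySem.List.pyRange 0 (((pvTokens df).length : Int))) none with hrdef
    have hrval : r = some ((wst : Int), (ist : Int)) := by
      rcases h1 with hnone | ⟨i0, hi0mem, hreq, hne⟩
      · rw [hnone] at hbeats
        simp [pvBeatsB] at hbeats
      · rw [PySem.List.mem_pyRange_one, pvTokens_len] at hi0mem
        have hi0c : i0 = ((i0.toNat : Nat) : Int) := by omega
        have hi0n : i0.toNat < df.length := by omega
        rcases pvCnd_spec np df mw hi0n with ⟨hnone, _⟩ | ⟨w0, hw01, hi0w0, hG0, hmin0, hcnd0⟩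
        · rw [hi0c, hnone] at hreq hne
          exact absurd rfl hne
        · rw [hi0c, hcnd0] at hreq hne
          by_cases hmw0 : (w0 : Int) ≤ mw
          · rw [if_pos hmw0] at hreq
            have hhit0 : pvHITb np df mw w0 = true := by
              rw [pvHITb_iff]
              exact ⟨hw01, hmw0, i0.toNat, hi0w0, hG0⟩
            have hwle : wst ≤ w0 := Nat.find_min' hex hhit0
            rw [hreq] at hbeats
            simp only [pvBeatsB, pvLtB] at hbeats
            rw [Bool.or_eq_false_iff, Bool.and_eq_false_iff] at hbeats
            have hweq : w0 = wst := by
              rcases hbeats with ⟨hb1, _⟩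
              simp only [decide_eq_false_iff_not] at hb1
              have : ¬ ((wst : Int) < (w0 : Int)) := hb1
              omega
            subst hweq
            have histle : ist ≤ i0.toNat := by
              apply Nat.find_min' hexi
              exact ⟨hi0w0, hG0⟩
            have hige : i0.toNat ≤ ist := by
              rcases hbeats with ⟨_, hb2⟩
              rcases hb2 with hb2 | hb2
              · simp at hb2
              · simp only [decide_eq_false_iff_not] at hb2
                omega
            have : i0.toNat = ist := by omega
            rw [hreq, this]
          · rw [if_neg hmw0] at hne
            exact absurd rfl hne
    rw [hrval]
  · -- no hit : both none
    have hAval : (PySem.List.pyRange 1 (mw + 1)).findSome?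
        (fun w => pvAInner np df (pvTokens df) (pvRaws df) w
          (PySem.List.pyRange 0 (((pvTokens df).length : Int) - w + 1))) = none := by
      apply pvFindSome?_pyRange_none
      intro w hw1 hw2
      apply pvInner_none np df hw1
      intro iN hiN
      by_contra hg
      rw [Bool.not_eq_false] at hg
      exact hex ⟨w.toNat, by rw [pvHITb_iff]; exact ⟨by omega, by omega, iN, hiN, hg⟩⟩
    rw [hAval]
    rcases h1 with hnone | ⟨i0, hi0mem, hreq, hne⟩
    · rw [hnone]
    · rw [PySem.List.mem_pyRange_one, pvTokens_len] at hi0mem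
      have hi0c : i0 = ((i0.toNat : Nat) : Int) := by omega
      have hi0n : i0.toNat < df.length := by omega
      rcases pvCnd_spec np df mw hi0n with ⟨hnone0, _⟩ | ⟨w0, hw01, hi0w0, hG0, hmin0, hcnd0⟩
      · rw [hi0c, hnone0] at hne
        exact absurd rfl hne
      · rw [hi0c, hcnd0] at hne
        by_cases hmw0 : (w0 : Int) ≤ mw
        · exact absurd ⟨w0, by rw [pvHITb_iff]; exact ⟨hw01, hmw0, i0.toNat, hi0w0, hG0⟩⟩ hex
        · rw [if_neg hmw0] at hne
          exact absurd rfl hne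

-- ===== VERDICT (by name: the statement is the Claim_ definition above) =====
theorem match_pii_py_spec : Claim_equal_match_pii_py := by
  intro norm_phrase df max_window _ _
  exact pvMain norm_phrase df max_window
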